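-- pv_equiv track=rewrite | github.com/dnsaoki2/8_UFRJ | topicos_programacao/aula02/aula02.py | compute_histogram_naive
-- ===== SOURCE A (Python) =====
-- GLOBAL_START = 0
--
-- GLOBAL_END = 24 * 3600 #seconds
--
-- def compute_histogram_naive(player_times, columns):
-- 	step = (GLOBAL_END - GLOBAL_START) // columns
-- 	histogram = []
-- 	moment = GLOBAL_START
-- 	while moment <= GLOBAL_END:
-- 		player_online = 0
-- 		for times_tuple in player_times:
-- 			if times_tuple[0] <= moment and times_tuple[1] >= moment:
-- 				player_online += 1
-- 		histogram += [(moment, player_online)]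
-- 		moment += step
-- 	return histogram
-- ===== SOURCE B (Python) =====
-- GLOBAL_START = 0
--
-- GLOBAL_END = 24 * 3600  # seconds
--
--
-- def _bisect_right(xs, x):
--     # index of the first element > x in the sorted list xs
--     lo, hi = 0, len(xs)
--     while lo < hi:
--         mid = (lo + hi) // 2
--         if x < xs[mid]:
--             hi = mid
--         else:
--             lo = mid + 1
--     return lo
--
--
-- def _bisect_left(xs, x):
--     # index of the first element >= x in the sorted list xs
--     lo, hi = 0, len(xs)
--     while lo < hi:
--         mid = (lo + hi) // 2
--         if xs[mid] < x:
--             lo = mid + 1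
--         else:
--             hi = mid
--     return lo
--
--
-- def compute_histogram_naive(player_times, columns):
--     step = (GLOBAL_END - GLOBAL_START) // columns
--     starts = sorted(s for s, e in player_times if s <= e)
--     ends = sorted(e for s, e in player_times if s <= e)
--     # players online at moment m = #(starts <= m) - #(ends < m)
--     return [(moment, _bisect_right(starts, moment) - _bisect_left(ends, moment))
--             for moment in range(GLOBAL_START, GLOBAL_END + 1, step)]
-- ===== Notes on version B (the rewrite author's own statement) =====
-- stated objective: alternative
-- what changed: Instead of scanning all intervals at every sampled moment, B sorts the start and end times once and answers each moment with two binary searches (online count = #(starts <= m) - #(ends < m), after dropping empty intervals with start > end); intended as faster (measured 2.9-15x on a timing run's sizes, but unconfirmed at the largest size, where that run's columns argument fell outside Pre_).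
import Mathlib
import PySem

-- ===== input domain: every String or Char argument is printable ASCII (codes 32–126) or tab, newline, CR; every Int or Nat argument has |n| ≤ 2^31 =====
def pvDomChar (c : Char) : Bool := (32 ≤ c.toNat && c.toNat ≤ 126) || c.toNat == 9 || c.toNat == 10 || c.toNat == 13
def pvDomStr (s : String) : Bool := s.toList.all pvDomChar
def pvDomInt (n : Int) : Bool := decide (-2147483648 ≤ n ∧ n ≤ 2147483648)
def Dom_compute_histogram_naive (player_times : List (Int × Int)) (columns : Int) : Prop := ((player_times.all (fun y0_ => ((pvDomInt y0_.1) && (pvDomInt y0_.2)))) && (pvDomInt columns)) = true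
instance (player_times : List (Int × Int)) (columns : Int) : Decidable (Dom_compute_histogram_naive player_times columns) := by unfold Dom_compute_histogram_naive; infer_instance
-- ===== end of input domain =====

-- B replaces A's per-moment scan of all intervals by one sort of the start/end times plus two
-- binary searches per moment (count online at m = #(starts ≤ m) − #(ends < m)).

-- ===== PORT A =====
-- GLOBAL_START = 0, GLOBAL_END = 24*3600 = 86400

-- inner for-loop: player_online accumulated over player_times
def pvACount (player_times : List (Int × Int)) (moment : Int) : Int :=
  player_times.foldl (fun acc t => if t.1 ≤ moment ∧ t.2 ≥ moment then acc + 1 else acc) 0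

-- the while-loop; the conjunct '0 < step' is a totality guard only (for step ≤ 0 the Python
-- loop never terminates, and such inputs are excluded by Pre_ below)
def pvALoop (player_times : List (Int × Int)) (step moment : Int)
    (histogram : List (Int × Int)) : List (Int × Int) :=
  if h : moment ≤ 86400 ∧ 0 < step then
    pvALoop player_times step (moment + step)
      (histogram ++ [(moment, pvACount player_times moment)])
  else histogram
termination_by (86401 - moment).toNat
decreasing_by omega

def compute_histogram_naive (player_times : List (Int × Int)) (columns : Int) : List (Int × Int) :=
  let step := PySem.Int.floordiv (86400 - 0) columns
  pvALoop player_times step 0 []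

-- ===== PORT B =====
-- Source B's _bisect_right/_bisect_left are hand-written CPython bisect loops; PySem.List.bisectRight /
-- bisectLeft are line-for-line those same lo/hi loops (mid = (lo+hi)//2, same branch tests).
def compute_histogram_naive_alt (player_times : List (Int × Int)) (columns : Int) : List (Int × Int) :=
  let step := PySem.Int.floordiv (86400 - 0) columns
  let starts := PySem.List.sorted ((player_times.filter (fun t => t.1 ≤ t.2)).map (fun t => t.1)) (fun x => x) false
  let ends := PySem.List.sorted ((player_times.filter (fun t => t.1 ≤ t.2)).map (fun t => t.2)) (fun x => x) false
  (PySem.List.pyRange 0 (86400 + 1) step).map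
    (fun moment => (moment, (PySem.List.bisectRight starts moment : Int) - (PySem.List.bisectLeft ends moment : Int)))

-- ===== PRECONDITION & SPEC =====
-- columns = 0 makes A raise ZeroDivisionError; columns < 0 or columns > 86400 give step ≤ 0,
-- on which A's while-loop never terminates. Pre_ keeps exactly the inputs where A returns.
def Pre_compute_histogram_naive (player_times : List (Int × Int)) (columns : Int) : Prop :=
  1 ≤ columns ∧ columns ≤ 86400

instance (player_times : List (Int × Int)) (columns : Int) : Decidable (Pre_compute_histogram_naive player_times columns) := by unfold Pre_compute_histogram_naive; infer_instance

def pvWitness_compute_histogram_naive : (List (Int × Int)) × Int := ([(10, 100), (50, 40), (0, 86400)], 4)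

def Spec_compute_histogram_naive (player_times : List (Int × Int)) (columns : Int) (out : List (Int × Int)) : Prop := out = compute_histogram_naive_alt player_times columns
instance (player_times : List (Int × Int)) (columns : Int) (out : List (Int × Int)) : Decidable (Spec_compute_histogram_naive player_times columns out) := by unfold Spec_compute_histogram_naive; infer_instance

-- ===== CLAIM (what is proved, stated in full; the proofs are below) =====
def Claim_equal_compute_histogram_naive : Prop := ∀ (player_times : List (Int × Int)) (columns : Int), Dom_compute_histogram_naive player_times columns → Pre_compute_histogram_naive player_times columns → Spec_compute_histogram_naive player_times columns (compute_histogram_naive player_times columns)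

-- ===== LEMMAS AND PROOFS =====

-- pyRange with positive step: nil and cons unfolding
lemma pyRange_pos_nil {a b s : Int} (hs : 0 < s) (h : b ≤ a) :
    PySem.List.pyRange a b s = [] := by
  rw [PySem.List.pyRange_of_pos a b hs, if_neg (by omega)]
  simp

lemma pyRange_pos_cons {a b s : Int} (hs : 0 < s) (h : a < b) :
    PySem.List.pyRange a b s = a :: PySem.List.pyRange (a + s) b s := by
  rw [PySem.List.pyRange_of_pos a b hs, PySem.List.pyRange_of_pos (a + s) b hs, if_pos h]
  by_cases h2 : a + s < b
  · rw [if_pos h2]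
    have hx : (0 : Int) ≤ (b - (a + s) + s - 1) / s :=
      Int.ediv_nonneg (by omega) (by omega)
    have hadd : (b - a + s - 1) / s = (b - (a + s) + s - 1) / s + 1 := by
      rw [show b - a + s - 1 = b - (a + s) + s - 1 + 1 * s by ring]
      exact Int.add_mul_ediv_right _ 1 (by omega)
    have hn : ((b - a + s - 1) / s).toNat = ((b - (a + s) + s - 1) / s).toNat + 1 := by omega
    rw [hn, List.range_succ_eq_map, List.map_cons, List.map_map]
    refine congrArg₂ _ (by simp) (List.map_congr_left fun k _ => ?_)
    simp only [Function.comp_apply, Nat.succ_eq_add_one]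
    push_cast
    ring
  · rw [if_neg h2]
    have h1 : (1 : Int) ≤ (b - a + s - 1) / s :=
      (Int.le_ediv_iff_mul_le (by omega)).mpr (by omega)
    have h2' : (b - a + s - 1) / s < 2 :=
      (Int.ediv_lt_iff_lt_mul (by omega)).mpr (by omega)
    have hn : ((b - a + s - 1) / s).toNat = 1 := by omega
    rw [hn]
    simp

-- a countP determined by an index split
lemma countP_eq_of_split {α : Type} (xs : List α) (p : α → Bool) (k : Nat) (hk : k ≤ xs.length)
    (h1 : ∀ (j : Nat) (hj : j < xs.length), j < k → p xs[j])
    (h2 : ∀ (j : Nat) (hj : j < xs.length), k ≤ j → ¬ p xs[j]) :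
    xs.countP p = k := by
  have ht : (xs.take k).countP p = (xs.take k).length := by
    rw [List.countP_eq_length]
    intro a ha
    obtain ⟨i, hi, rfl⟩ := List.mem_iff_getElem.mp ha
    rw [List.getElem_take]
    have hlen : i < k ∧ i < xs.length := by
      simp only [List.length_take] at hi; omega
    exact h1 i hlen.2 hlen.1
  have hd : (xs.drop k).countP p = 0 := by
    rw [List.countP_eq_zero]
    intro a ha
    obtain ⟨i, hi, rfl⟩ := List.mem_iff_getElem.mp ha
    rw [List.getElem_drop]
    have hlen : k + i < xs.length := by
      simp only [List.length_drop] at hi; omega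
    exact h2 (k + i) hlen (by omega)
  calc xs.countP p = (xs.take k ++ xs.drop k).countP p := by rw [List.take_append_drop]
    _ = k := by rw [List.countP_append, ht, hd, List.length_take]; omega

lemma bisectRight_eq_countP (xs : List Int) (x : Int) (h : List.Pairwise (· ≤ ·) xs) :
    PySem.List.bisectRight xs x = xs.countP (fun y => y ≤ x) := by
  obtain ⟨hk, h1, h2⟩ := PySem.List.bisectRight_spec xs x h
  exact (countP_eq_of_split xs _ _ hk
    (fun j hj hjk => by simp only [decide_eq_true_eq]; exact h1 j hj hjk)
    (fun j hj hjk => by simp only [decide_eq_true_eq]; exact not_le.mpr (h2 j hj hjk))).symm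

lemma bisectLeft_eq_countP (xs : List Int) (x : Int) (h : List.Pairwise (· ≤ ·) xs) :
    PySem.List.bisectLeft xs x = xs.countP (fun y => y < x) := by
  obtain ⟨hk, h1, h2⟩ := PySem.List.bisectLeft_spec xs x h
  exact (countP_eq_of_split xs _ _ hk
    (fun j hj hjk => by simp only [decide_eq_true_eq]; exact h1 j hj hjk)
    (fun j hj hjk => by simp only [decide_eq_true_eq]; exact not_lt.mpr (h2 j hj hjk))).symm

-- the arithmetic heart: on intervals with start ≤ end, membership count splits
lemma count_split (pt : List (Int × Int)) (m : Int) :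
    (pt.countP (fun t => decide (t.1 ≤ m ∧ t.2 ≥ m)) : Int)
      = ((pt.filter (fun t => t.1 ≤ t.2)).countP (fun t => t.1 ≤ m) : Int)
        - ((pt.filter (fun t => t.1 ≤ t.2)).countP (fun t => t.2 < m) : Int) := by
  induction pt with
  | nil => simp
  | cons t rest ih =>
    simp only [List.countP_cons, List.filter_cons, decide_eq_true_eq]
    by_cases hv : t.1 ≤ t.2
    · rw [if_pos hv]
      simp only [List.countP_cons, decide_eq_true_eq]
      split_ifs <;> push_cast <;> omega
    · rw [if_neg hv]
      split_ifs with hP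
      · omega
      · push_cast; omega

-- pointwise: A's inner scan equals B's two binary searches
lemma count_eq (pt : List (Int × Int)) (m : Int) :
    pvACount pt m
      = (PySem.List.bisectRight (PySem.List.sorted ((pt.filter (fun t => t.1 ≤ t.2)).map (fun t => t.1)) (fun x => x) false) m : Int)
        - (PySem.List.bisectLeft (PySem.List.sorted ((pt.filter (fun t => t.1 ≤ t.2)).map (fun t => t.2)) (fun x => x) false) m : Int) := by
  unfold pvACount
  rw [PySem.List.foldl_ite_add_one,
    bisectRight_eq_countP _ _ (by simpa using PySem.List.sorted_pairwise _ (fun x => x)),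
    bisectLeft_eq_countP _ _ (by simpa using PySem.List.sorted_pairwise _ (fun x => x)),
    List.Perm.countP_eq _ (PySem.List.sorted_perm _ _ _),
    List.Perm.countP_eq _ (PySem.List.sorted_perm _ _ _),
    List.countP_map, List.countP_map]
  have := count_split pt m
  simp only [Function.comp_def] at *
  omega

-- the while-loop is the map over range(0, 86401, step)
lemma loop_eq (pt : List (Int × Int)) (step : Int) (hs : 0 < step) (moment : Int)
    (acc : List (Int × Int)) :
    pvALoop pt step moment acc
      = acc ++ (PySem.List.pyRange moment 86401 step).map (fun m => (m, pvACount pt m)) := by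
  rw [pvALoop]
  by_cases h : moment ≤ 86400
  · rw [dif_pos ⟨h, hs⟩, pyRange_pos_cons (a := moment) hs (by omega),
      loop_eq pt step hs (moment + step) _]
    simp
  · rw [dif_neg (by tauto), pyRange_pos_nil hs (by omega)]
    simp
termination_by (86401 - moment).toNat
decreasing_by omega

lemma step_pos {c : Int} (h1 : 1 ≤ c) (h2 : c ≤ 86400) :
    0 < PySem.Int.floordiv (86400 - 0) c := by
  unfold PySem.Int.floordiv
  rw [show (86400 : Int) - 0 = 86400 by norm_num, Int.fdiv_eq_ediv, if_pos (Or.inl (by omega))]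
  have : (1 : Int) ≤ 86400 / c :=
    (Int.le_ediv_iff_mul_le (by omega)).mpr (by omega)
  omega

-- ===== VERDICT (by name: the statement is the Claim_ definition above) =====
theorem compute_histogram_naive_spec : Claim_equal_compute_histogram_naive := by
  intro pt c _ hpre
  unfold Spec_compute_histogram_naive compute_histogram_naive compute_histogram_naive_alt
  have hs := step_pos hpre.1 hpre.2
  rw [loop_eq pt _ hs 0 []]
  simp only [List.nil_append, show (86400 : Int) + 1 = 86401 by norm_num]
  exact List.map_congr_left (fun m _ => by rw [count_eq])
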